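-- pv_equiv track=rewrite | github.com/sloppyjuicy/docs-1 | tools/tensorflow_docs/api_generator/gen_java/processing.py | sort_toc
-- ===== SOURCE A (Python) =====
-- from typing import Any, Iterable, Mapping, Sequence
--
-- Toc = Mapping[str, Sequence[Mapping[str, Any]]]
--
-- def sort_toc(toc: Toc, labels: Iterable[str]) -> Toc:
--   """Pre-sort the TOC entries by `labels`."""
--   new_toc = []
--   remaining_entries = list(toc.get('toc', []))
--   for label in labels:
--     more_specific_labels = [l for l in labels if len(l) > len(label)]
--     for entry in remaining_entries[:]:  # copy so we can remove() later
--       title = entry.get('title', '')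
--       better_match_exists = any(
--           [title.startswith(l) for l in more_specific_labels])
--       if title.startswith(label) and not better_match_exists:
--         new_toc.append(entry)
--         # Remove the matched entry so it doesn't duplicate, and so we can track
--         # any un-matched entries.
--         remaining_entries.remove(entry)
--
--   return {'toc': new_toc + remaining_entries}
-- ===== SOURCE B (Python) =====
-- def sort_toc(toc, labels):
--   """Pre-sort the TOC entries by `labels`.
--
--   One pass per entry finds its longest matching label, entries are grouped
--   in a dict, then the groups are emitted in label order (O(N*L) instead of
--   A's O(L^2*N) label-pair scanning).
--   """
--   labels = list(labels)
--   entries = list(toc.get('toc', []))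
--
--   def best(title):
--     b = None
--     for l in labels:
--       if title.startswith(l) and (b is None or len(l) > len(b)):
--         b = l
--     return b
--
--   groups = {}
--   unmatched = []
--   for entry in entries:
--     b = best(entry.get('title', ''))
--     if b is None:
--       unmatched.append(entry)
--     else:
--       groups[b] = groups.get(b, []) + [entry]
--
--   new_toc = []
--   seen = set()
--   for l in labels:
--     if l in seen:
--       continue
--     seen.add(l)
--     new_toc.extend(groups.get(l, []))
--
--   return {'toc': new_toc + unmatched}
-- ===== Notes on version B (the rewrite author's own statement) =====
-- stated objective: faster
-- what changed: Instead of scanning all entries once per label and re-deriving the 'a longer label also matches' test from a per-label filter of the whole label list, B computes each entry's single longest matching label in one pass over the labels, groups entries in a dict, and emits the groups in (deduplicated) label order.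
import Mathlib
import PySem

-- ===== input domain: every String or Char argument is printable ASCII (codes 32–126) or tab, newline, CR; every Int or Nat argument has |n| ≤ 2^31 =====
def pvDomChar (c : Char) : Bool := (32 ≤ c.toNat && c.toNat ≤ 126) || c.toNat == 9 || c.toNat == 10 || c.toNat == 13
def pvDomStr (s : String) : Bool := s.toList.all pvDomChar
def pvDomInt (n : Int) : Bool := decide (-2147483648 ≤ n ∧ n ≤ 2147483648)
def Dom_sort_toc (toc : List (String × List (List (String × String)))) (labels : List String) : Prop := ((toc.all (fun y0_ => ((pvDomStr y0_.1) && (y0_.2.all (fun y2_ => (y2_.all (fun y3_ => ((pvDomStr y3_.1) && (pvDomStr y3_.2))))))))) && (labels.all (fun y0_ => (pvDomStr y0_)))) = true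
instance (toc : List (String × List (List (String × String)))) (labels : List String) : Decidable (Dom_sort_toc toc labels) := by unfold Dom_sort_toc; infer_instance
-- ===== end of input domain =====

-- B groups each entry under its longest matching label in one pass per entry (A rescans all entries for every label); same return value, no mutation of the arguments.

-- ===== PORT A =====
-- entry.get('title', '')  (shared by both ports: both Pythons read the title the same way)
def pvEntryTitle (e : List (String × String)) : String :=
  PySem.Dict.getD (PySem.Dict.mk e) "title" ""

-- inner 'for entry in remaining_entries[:]' loop: iterates the copy, state = (new_toc, remaining_entries);
-- 'remaining_entries.remove(entry)' removes the first equal element — it always succeeds here because the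
-- copy was taken from remaining_entries and equal entries match the same labels, so '.getD st.2' (the
-- ValueError branch) is unreachable.
def pvInnerA (msl : List String) (label : String) :
    List (List (String × String)) →
    List (List (String × String)) × List (List (String × String)) →
    List (List (String × String)) × List (List (String × String))
  | [], st => st
  | e :: rest, st =>
      let title := pvEntryTitle e
      let better_match_exists := msl.any (fun l => PySem.Str.startswith title l)
      if PySem.Str.startswith title label && !better_match_exists then
        pvInnerA msl label rest (st.1 ++ [e], (PySem.List.remove? st.2 e).getD st.2)
      else
        pvInnerA msl label rest st

def sort_toc (toc : List (String × List (List (String × String)))) (labels : List String) :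
    List (String × List (List (String × String))) :=
  let remaining_entries := PySem.Dict.getD (PySem.Dict.mk toc) "toc" []
  let st := labels.foldl
    (fun st label =>
      let more_specific_labels := labels.filter (fun l => PySem.Str.len l > PySem.Str.len label)
      pvInnerA more_specific_labels label st.2 st)
    (([], remaining_entries) : List (List (String × String)) × List (List (String × String)))
  [("toc", st.1 ++ st.2)]

-- ===== PORT B =====
-- best(title): the longest label prefixing `title` (first one of that length), in one pass over labels
def pvBest (labels : List String) (title : String) : Option String :=
  labels.foldl
    (fun b l =>
      if PySem.Str.startswith title l &&
         (match b with
          | none => true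
          | some m => PySem.Str.len l > PySem.Str.len m) then some l else b)
    none

def sort_toc_alt (toc : List (String × List (List (String × String)))) (labels : List String) :
    List (String × List (List (String × String))) :=
  let entries := PySem.Dict.getD (PySem.Dict.mk toc) "toc" []
  -- grouping pass: groups[b] = groups.get(b, []) + [entry]  /  unmatched.append(entry)
  let gu := entries.foldl
    (fun (st : PySem.Dict String (List (List (String × String))) × List (List (String × String))) e =>
      match pvBest labels (pvEntryTitle e) with
      | none => (st.1, st.2 ++ [e])
      | some b => (st.1.insert b (st.1.getD b [] ++ [e]), st.2))
    (PySem.Dict.empty, [])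
  -- emission pass over labels, skipping duplicates with `seen`
  let out := labels.foldl
    (fun (st : List (List (String × String)) × PySem.Set String) l =>
      if PySem.Set.contains st.2 l then st
      else (st.1 ++ gu.1.getD l [], PySem.Set.add st.2 l))
    ([], PySem.Set.empty)
  [("toc", out.1 ++ gu.2)]

-- ===== PRECONDITION & SPEC =====
def Spec_sort_toc (toc : List (String × List (List (String × String)))) (labels : List String) (out : List (String × List (List (String × String)))) : Prop := out = sort_toc_alt toc labels
instance (toc : List (String × List (List (String × String)))) (labels : List String) (out : List (String × List (List (String × String)))) : Decidable (Spec_sort_toc toc labels out) := by unfold Spec_sort_toc; infer_instance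

-- ===== CLAIM (what is proved, stated in full; the proofs are below) =====
def Claim_equal_sort_toc : Prop := ∀ (toc : List (String × List (List (String × String)))) (labels : List String), Dom_sort_toc toc labels → Spec_sort_toc toc labels (sort_toc toc labels)

-- ===== LEMMAS AND PROOFS =====

-- proof-only abbreviations (not used by the ports)
def pvCnd (labels : List String) (l : String) (e : List (String × String)) : Bool :=
  pvBest labels (pvEntryTitle e) == some l

-- canonical form both ports are reduced to
def pvCanon (labels : List String) : List String → List (List (String × String)) → List (List (String × String))
  | [], _ => []
  | l :: ls, rem =>
      rem.filter (pvCnd labels l) ++ pvCanon labels ls (rem.filter (fun e => !pvCnd labels l e))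

-- two prefixes of the same string with equal lengths are equal
theorem pvPrefix_unique {t a b : String}
    (ha : PySem.Str.startswith t a = true) (hb : PySem.Str.startswith t b = true)
    (hl : PySem.Str.len a = PySem.Str.len b) : a = b := by
  rw [PySem.Str.startswith_eq] at ha hb
  rw [PySem.Chars.startswith_iff] at ha hb
  rw [PySem.Str.len_eq, PySem.Str.len_eq] at hl
  have hlen : a.toList.length = b.toList.length := by exact_mod_cast hl
  apply String.toList_inj.mp
  rw [List.prefix_iff_eq_take] at ha hb
  rw [ha, hb, hlen]

-- specification of pvBest: none = no label matches; some m = the longest matching label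
theorem pvBest_spec (labels : List String) (t : String) :
    (pvBest labels t = none → ∀ l ∈ labels, PySem.Str.startswith t l = false) ∧
    (∀ m, pvBest labels t = some m →
      m ∈ labels ∧ PySem.Str.startswith t m = true ∧
        ∀ l ∈ labels, PySem.Str.startswith t l = true → PySem.Str.len l ≤ PySem.Str.len m) := by
  induction labels using List.reverseRecOn with
  | nil => simp [pvBest]
  | append_singleton ls l ih =>
    have hstep : pvBest (ls ++ [l]) t =
        (if PySem.Str.startswith t l &&
            (match pvBest ls t with
             | none => true
             | some m => PySem.Str.len l > PySem.Str.len m) then some l else pvBest ls t) := by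
      simp only [pvBest, List.foldl_append, List.foldl_cons, List.foldl_nil]
    rcases hr : pvBest ls t with _ | m0 <;> rw [hr] at hstep
    · by_cases hsw : PySem.Str.startswith t l = true
      · simp only [hsw, Bool.and_true, if_true] at hstep
        refine ⟨fun h => by simp [hstep] at h, fun m hm => ?_⟩
        rw [hstep] at hm
        injection hm with hm; subst hm
        refine ⟨by simp, hsw, fun l' hl' hsw' => ?_⟩
        rcases List.mem_append.mp hl' with h1 | h1
        · rw [ih.1 hr l' h1] at hsw'; cases hsw'
        · simp at h1; subst h1; exact le_refl _
      · have hsw' : PySem.Str.startswith t l = false := by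
          cases h : PySem.Str.startswith t l
          · rfl
          · exact absurd h hsw
        simp only [hsw', Bool.false_and] at hstep
        refine ⟨fun _ l' hl' => ?_, fun m hm => by rw [hstep] at hm; exact absurd hm (by simp)⟩
        rcases List.mem_append.mp hl' with h1 | h1
        · exact ih.1 hr l' h1
        · simp at h1; subst h1; exact hsw'
    · by_cases hc : (PySem.Str.startswith t l && decide (PySem.Str.len l > PySem.Str.len m0)) = true
      · have hc2 : PySem.Str.startswith t l = true ∧ PySem.Str.len m0 < PySem.Str.len l := by
          simpa using hc
        simp only [hc2.1, Bool.true_and, decide_eq_true_eq] at hstep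
        rw [if_pos (by exact hc2.2)] at hstep
        refine ⟨fun h => by simp [hstep] at h, fun m hm => ?_⟩
        rw [hstep] at hm; injection hm with hm; subst hm
        refine ⟨by simp, hc2.1, fun l' hl' hsw' => ?_⟩
        rcases List.mem_append.mp hl' with h1 | h1
        · have := (ih.2 m0 hr).2.2 l' h1 hsw'
          have := hc2.2
          omega
        · simp at h1; subst h1; exact le_refl _
      · have hc2 : PySem.Str.startswith t l = false ∨ PySem.Str.len l ≤ PySem.Str.len m0 := by
          by_cases hsw : PySem.Str.startswith t l = true
          · right
            simp only [hsw, Bool.true_and, decide_eq_true_eq] at hc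
            omega
          · left
            cases h : PySem.Str.startswith t l
            · rfl
            · exact absurd h hsw
        rw [if_neg hc] at hstep
        refine ⟨fun h => by rw [hstep] at h; exact absurd h (by simp), fun m hm => ?_⟩
        rw [hstep] at hm; injection hm with hm; subst hm
        obtain ⟨h1, h2, h3⟩ := ih.2 m0 hr
        refine ⟨List.mem_append.mpr (Or.inl h1), h2, fun l' hl' hsw' => ?_⟩
        rcases List.mem_append.mp hl' with h4 | h4
        · exact h3 l' h4 hsw'
        · simp at h4; subst h4
          rcases hc2 with h5 | h5
          · rw [hsw'] at h5; cases h5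
          · exact h5

-- A's per-entry test ("label matches and no longer label does") says exactly "label is the entry's best match"
theorem pvCondA_eq_cnd (labels : List String) (label : String) (hmem : label ∈ labels)
    (e : List (String × String)) :
    (PySem.Str.startswith (pvEntryTitle e) label &&
      !((labels.filter (fun l => PySem.Str.len l > PySem.Str.len label)).any
          (fun l => PySem.Str.startswith (pvEntryTitle e) l))) = pvCnd labels label e := by
  set t := pvEntryTitle e with ht
  have hrw : pvCnd labels label e = (pvBest labels t == some label) := rfl
  rw [hrw]
  rcases hb : pvBest labels t with _ | m
  · have h1 : PySem.Str.startswith t label = false := (pvBest_spec labels t).1 hb label hmem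
    rw [h1, Bool.false_and]
    rfl
  · obtain ⟨hm1, hm2, hm3⟩ := (pvBest_spec labels t).2 m hb
    by_cases heq : m = label
    · subst heq
      have hany : ((labels.filter (fun l => PySem.Str.len l > PySem.Str.len m)).any
          (fun l => PySem.Str.startswith t l)) = false := by
        rw [List.any_eq_false]
        intro l hl
        rw [List.mem_filter] at hl
        have hlen : PySem.Str.len m < PySem.Str.len l := by simpa using hl.2
        intro hsw
        have := hm3 l hl.1 hsw
        omega
      rw [hm2, hany]
      simp
    · by_cases hsw : PySem.Str.startswith t label = true
      · have hlt : PySem.Str.len label < PySem.Str.len m := by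
          have hle := hm3 label hmem hsw
          rcases lt_or_eq_of_le hle with h | h
          · exact h
          · exact absurd (pvPrefix_unique hsw hm2 h) (fun hx => heq hx.symm)
        have hany : ((labels.filter (fun l => PySem.Str.len l > PySem.Str.len label)).any
            (fun l => PySem.Str.startswith t l)) = true := by
          rw [List.any_eq_true]
          exact ⟨m, List.mem_filter.mpr ⟨hm1, by simpa using hlt⟩, hm2⟩
        rw [hsw, hany]
        simp [heq]
      · have h1 : PySem.Str.startswith t label = false := by
          cases h : PySem.Str.startswith t label
          · rfl
          · exact absurd h hsw
        rw [h1, Bool.false_and]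
        simp [heq]

-- '.remove(e)' behind a prefix holding no element equal to e removes the head occurrence
theorem pvRemove_append {α : Type} [BEq α] [LawfulBEq α] (q xs : List α) (e : α)
    (h : ∀ a ∈ q, a ≠ e) : PySem.List.remove? (q ++ e :: xs) e = some (q ++ xs) := by
  induction q with
  | nil => simp [PySem.List.remove?_cons_self (x := e) (xs := xs)]
  | cons a q ih =>
    rw [List.cons_append, PySem.List.remove?_cons_of_ne _ (h a (by simp)),
      ih (fun b hb => h b (by simp [hb]))]
    rfl

-- the inner loop is a partition of the iterated copy
theorem pvInnerA_spec (msl : List String) (label : String)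
    (xs : List (List (String × String))) :
    ∀ q acc : List (List (String × String)),
    (∀ a ∈ q,
      (PySem.Str.startswith (pvEntryTitle a) label &&
        !(msl.any (fun l => PySem.Str.startswith (pvEntryTitle a) l))) = false) →
    pvInnerA msl label xs (acc, q ++ xs) =
      (acc ++ xs.filter (fun e => PySem.Str.startswith (pvEntryTitle e) label &&
          !(msl.any (fun l => PySem.Str.startswith (pvEntryTitle e) l))),
       q ++ xs.filter (fun e => !(PySem.Str.startswith (pvEntryTitle e) label &&
          !(msl.any (fun l => PySem.Str.startswith (pvEntryTitle e) l))))) := by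
  induction xs with
  | nil => intro q acc hq; simp [pvInnerA]
  | cons e rest ih =>
    intro q acc hq
    by_cases hc : (PySem.Str.startswith (pvEntryTitle e) label &&
        !(msl.any (fun l => PySem.Str.startswith (pvEntryTitle e) l))) = true
    · have hne : ∀ a ∈ q, a ≠ e := by
        intro a ha contra; subst contra
        rw [hq a ha] at hc; cases hc
      have hrem := pvRemove_append q rest e hne
      simp only [pvInnerA, hc, if_true, hrem]
      have := ih q (acc ++ [e]) hq
      simp only [Option.getD_some]
      rw [this]
      simp only [List.filter_cons, hc, Bool.not_true, if_true, Bool.false_eq_true, if_false]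
      simp
    · have hc' : (PySem.Str.startswith (pvEntryTitle e) label &&
          !(msl.any (fun l => PySem.Str.startswith (pvEntryTitle e) l))) = false := by
        cases h : (PySem.Str.startswith (pvEntryTitle e) label &&
          !(msl.any (fun l => PySem.Str.startswith (pvEntryTitle e) l)))
        · rfl
        · exact absurd h hc
      have hq' : ∀ a ∈ q ++ [e],
          (PySem.Str.startswith (pvEntryTitle a) label &&
            !(msl.any (fun l => PySem.Str.startswith (pvEntryTitle a) l))) = false := by
        intro a ha
        rcases List.mem_append.mp ha with h1 | h1
        · exact hq a h1
        · simp at h1; subst h1; exact hc'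
      have := ih (q ++ [e]) acc hq'
      simp only [pvInnerA, hc', Bool.false_eq_true, if_false]
      rw [show q ++ e :: rest = (q ++ [e]) ++ rest by simp]
      rw [this]
      simp only [List.filter_cons, hc', Bool.not_false, if_true, Bool.false_eq_true, if_false]
      simp

-- A's outer loop in canonical form
theorem pvOuterA_spec (labels : List String) (ls : List String) (hls : ∀ l ∈ ls, l ∈ labels) :
    ∀ acc rem : List (List (String × String)),
    ls.foldl
      (fun st label =>
        let more_specific_labels := labels.filter (fun l => PySem.Str.len l > PySem.Str.len label)
        pvInnerA more_specific_labels label st.2 st) (acc, rem) =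
      (acc ++ pvCanon labels ls rem,
       rem.filter (fun e => ls.all (fun l => !pvCnd labels l e))) := by
  induction ls with
  | nil => intro acc rem; simp [pvCanon]
  | cons l ls ih =>
    intro acc rem
    have hmem : l ∈ labels := hls l (by simp)
    rw [List.foldl_cons]
    have hstep := pvInnerA_spec (labels.filter (fun l' => PySem.Str.len l' > PySem.Str.len l)) l
      rem [] acc (by intro a ha; cases ha)
    simp only [List.nil_append] at hstep
    rw [hstep]
    have hf1 : rem.filter (fun e => PySem.Str.startswith (pvEntryTitle e) l &&
        !((labels.filter (fun l' => PySem.Str.len l' > PySem.Str.len l)).any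
          (fun l' => PySem.Str.startswith (pvEntryTitle e) l'))) = rem.filter (pvCnd labels l) :=
      List.filter_congr (fun e _ => pvCondA_eq_cnd labels l hmem e)
    have hf2 : rem.filter (fun e => !(PySem.Str.startswith (pvEntryTitle e) l &&
        !((labels.filter (fun l' => PySem.Str.len l' > PySem.Str.len l)).any
          (fun l' => PySem.Str.startswith (pvEntryTitle e) l')))) =
        rem.filter (fun e => !pvCnd labels l e) :=
      List.filter_congr (fun e _ => by rw [pvCondA_eq_cnd labels l hmem e])
    rw [hf1, hf2, ih (fun l' h => hls l' (by simp [h]))]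
    refine Prod.ext ?_ ?_ <;> dsimp only
    · rw [pvCanon, List.append_assoc]
    · rw [List.filter_filter]
      exact List.filter_congr (fun e _ => by rw [List.all_cons, Bool.and_comm])

-- B's grouping pass: each group is a filter of entries, unmatched are the no-match entries
theorem pvGroups_spec (labels : List String) (entries : List (List (String × String))) :
    ∀ (d : PySem.Dict String (List (List (String × String)))) (u : List (List (String × String))),
    (∀ l, (entries.foldl
      (fun (st : PySem.Dict String (List (List (String × String))) × List (List (String × String))) e =>
        match pvBest labels (pvEntryTitle e) with
        | none => (st.1, st.2 ++ [e])
        | some b => (st.1.insert b (st.1.getD b [] ++ [e]), st.2)) (d, u)).1.getD l [] =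
        d.getD l [] ++ entries.filter (pvCnd labels l)) ∧
    (entries.foldl
      (fun (st : PySem.Dict String (List (List (String × String))) × List (List (String × String))) e =>
        match pvBest labels (pvEntryTitle e) with
        | none => (st.1, st.2 ++ [e])
        | some b => (st.1.insert b (st.1.getD b [] ++ [e]), st.2)) (d, u)).2 =
        u ++ entries.filter (fun e => (pvBest labels (pvEntryTitle e)).isNone) := by
  induction entries with
  | nil => intro d u; simp
  | cons e rest ih =>
    intro d u
    rcases hb : pvBest labels (pvEntryTitle e) with _ | b
    · have hstep : ∀ l, pvCnd labels l e = false := by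
        intro l; simp [pvCnd, hb]
      simp only [List.foldl_cons, hb]
      refine ⟨fun l => ?_, ?_⟩
      · rw [(ih d (u ++ [e])).1 l]
        simp [hstep l]
      · rw [(ih d (u ++ [e])).2]
        simp [hb]
    · simp only [List.foldl_cons, hb]
      refine ⟨fun l => ?_, ?_⟩
      · rw [(ih (d.insert b (d.getD b [] ++ [e])) u).1 l]
        rw [PySem.Dict.getD_insert]
        by_cases hl : l = b
        · subst hl
          have hce : pvCnd labels l e = true := by simp [pvCnd, hb]
          simp [hce]
        · have hce : pvCnd labels l e = false := by
            simp [pvCnd, hb]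
            exact fun hx => hl hx.symm
          simp [hce, hl]
      · rw [(ih (d.insert b (d.getD b [] ++ [e])) u).2]
        simp [hb]

-- B's emission pass in canonical form
theorem pvEmit_spec (labels : List String) (entries : List (List (String × String)))
    (g : PySem.Dict String (List (List (String × String))))
    (hg : ∀ l, g.getD l [] = entries.filter (pvCnd labels l)) :
    ∀ (ls : List String) (acc : List (List (String × String))) (s : PySem.Set String),
    (ls.foldl
      (fun (st : List (List (String × String)) × PySem.Set String) l =>
        if PySem.Set.contains st.2 l then st
        else (st.1 ++ g.getD l [], PySem.Set.add st.2 l)) (acc, s)).1 =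
      acc ++ pvCanon labels ls (entries.filter (fun e => s.all (fun l => !pvCnd labels l e))) := by
  intro ls
  induction ls with
  | nil => intro acc s; simp [pvCanon]
  | cons l ls ih =>
    intro acc s
    rw [List.foldl_cons]
    by_cases hcon : PySem.Set.contains s l = true
    · have hmem : l ∈ s := by simpa [PySem.Set.contains] using hcon
      rw [if_pos hcon]
      rw [ih acc s]
      congr 1
      rw [pvCanon]
      have hkill : ∀ e ∈ entries,
          (s.all (fun l' => !pvCnd labels l' e)) = true → pvCnd labels l e = false := by
        intro e _ hall
        have := (List.all_eq_true.mp hall) l hmem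
        simpa using this
      have h1 : (entries.filter (fun e => s.all (fun l' => !pvCnd labels l' e))).filter
          (pvCnd labels l) = [] := by
        rw [List.filter_filter]
        rw [List.filter_eq_nil_iff]
        intro e he
        simp only [Bool.and_eq_true, not_and]
        intro hcnd hall
        rw [hkill e he hall] at hcnd
        cases hcnd
      have h2 : (entries.filter (fun e => s.all (fun l' => !pvCnd labels l' e))).filter
          (fun e => !pvCnd labels l e) =
          entries.filter (fun e => s.all (fun l' => !pvCnd labels l' e)) := by
        rw [List.filter_filter]
        refine List.filter_congr (fun e he => ?_)
        cases hall : (s.all (fun l' => !pvCnd labels l' e))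
        · simp
        · simp [hkill e he hall]
      rw [h1, h2, List.nil_append]
    · rw [if_neg hcon]
      have hnmem : l ∉ s := by
        intro hmem
        exact hcon (by simpa [PySem.Set.contains] using hmem)
      rw [ih (acc ++ g.getD l []) (s.add l), hg l]
      rw [pvCanon, ← List.append_assoc]
      congr 1
      · congr 1
        rw [List.filter_filter]
        refine (List.filter_congr (fun e _ => ?_)).symm
        cases hcnd : pvCnd labels l e
        · simp
        · have hall : (s.all (fun l' => !pvCnd labels l' e)) = true := by
            rw [List.all_eq_true]
            intro l' hl'
            cases h : pvCnd labels l' e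
            · simp
            · exfalso
              have h1 : pvBest labels (pvEntryTitle e) = some l := by
                simpa [pvCnd] using hcnd
              have h2 : pvBest labels (pvEntryTitle e) = some l' := by
                simpa [pvCnd] using h
              rw [h1] at h2
              injection h2 with h2
              exact hnmem (h2 ▸ hl')
          simp [hall]
      · congr 1
        have hadd : PySem.Set.add s l = s ++ [l] := by
          simp only [PySem.Set.add]
          split
          · rename_i hx
            exact absurd hx hcon
          · rfl
        rw [hadd, List.filter_filter]
        refine List.filter_congr (fun e _ => ?_)
        rw [List.all_append]
        simp [Bool.and_comm]

-- A's leftover entries are exactly B's unmatched entries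
theorem pvLeftover_eq (labels : List String) (entries : List (List (String × String))) :
    entries.filter (fun e => labels.all (fun l => !pvCnd labels l e)) =
      entries.filter (fun e => (pvBest labels (pvEntryTitle e)).isNone) := by
  refine List.filter_congr (fun e _ => ?_)
  rcases hb : pvBest labels (pvEntryTitle e) with _ | m
  · simp only [Option.isNone_none]
    rw [List.all_eq_true]
    intro l _
    simp [pvCnd, hb]
  · simp only [Option.isNone_some]
    have hm : m ∈ labels := ((pvBest_spec labels (pvEntryTitle e)).2 m hb).1
    rw [List.all_eq_false]
    exact ⟨m, hm, by simp [pvCnd, hb]⟩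

-- ===== VERDICT (by name: the statement is the Claim_ definition above) =====
theorem sort_toc_spec : Claim_equal_sort_toc := by
  unfold Claim_equal_sort_toc
  intro toc labels _
  unfold Spec_sort_toc
  unfold sort_toc sort_toc_alt
  dsimp only
  set entries := PySem.Dict.getD (PySem.Dict.mk toc) "toc"
    ([] : List (List (String × String))) with hent
  rw [pvOuterA_spec labels labels (fun _ h => h) [] entries]
  have hgroups := pvGroups_spec labels entries PySem.Dict.empty []
  have hg : ∀ l, (entries.foldl
      (fun (st : PySem.Dict String (List (List (String × String))) × List (List (String × String))) e =>
        match pvBest labels (pvEntryTitle e) with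
        | none => (st.1, st.2 ++ [e])
        | some b => (st.1.insert b (st.1.getD b [] ++ [e]), st.2)) (PySem.Dict.empty, [])).1.getD l [] =
      entries.filter (pvCnd labels l) := by
    intro l
    rw [hgroups.1 l, PySem.Dict.getD_empty, List.nil_append]
  rw [pvEmit_spec labels entries _ hg labels [] PySem.Set.empty]
  rw [hgroups.2]
  have hfull : entries.filter
      (fun e => (PySem.Set.empty : PySem.Set String).all (fun l => !pvCnd labels l e)) = entries := by
    simp [PySem.Set.empty]
  rw [hfull, pvLeftover_eq labels entries]
  simp
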